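-- pv_equiv track=rewrite | github.com/quantum2classical/blues | blues/visualization/choose_calculate_mo.py | my_mo_list
-- ===== SOURCE A (Python) =====
-- def my_mo_list(before_homo, after_homo):
--     """
--     parameters
--     ----------
--     filename: string of molden file to be read
--
--     before_homo: integer, how many MOs to calculate before HOMO. Can be < 0
--     if only MOs after homo are to be calculated. Must stay within MO range
--
--     after_homo: integer, how many MOs to caluclate after HOMO
--
--
--     returns:
--     ----------
--
--     orbital_string_input: string input used in calc_mo function
--
--     Also prints list of strings of MOs which the user has chosen to be
--     calculated
--     """
--
--     # ensure correct input type
--     assert isinstance(before_homo, int), 'input must be integer'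
--     assert isinstance(after_homo, int), 'input must be integer'
--
--
--     if before_homo and after_homo < 0:
--         raise Exception('list must begin at lowest MO, this list would be reversed')
--     elif after_homo < 0 and abs(after_homo) > abs(before_homo):
--         raise Exception('if after_homo is negative, absolute value must be less or equal to before_homo')
--     elif before_homo < 0 and abs(before_homo) > abs(after_homo):
--         raise Exception('if before_homo is negative, absolute value must be less or equal to after_homo')
--     else:
--         pass
--
--     # make string to input into orbkit's calculation function
--     orbital_string_input = 'homo-'+str(before_homo)+':lumo+'+str(after_homo)
--
--     # make list of orbitals user wishes to have calculated
--     orbital_list = []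
--     orb_list = ['HOMO+'+str(x) for x in range(-before_homo, after_homo+1)]
--
--     for x in range(len(orb_list)):
--         if '-' in orb_list[x]:
--             orbital_list.append(orb_list[x].replace('+', ''))
--         elif '0' in orb_list[x]:
--             orbital_list.append(orb_list[x].replace('+0',''))
--         elif orb_list[x]=='HOMO+1':
--             orbital_list.append('LUMO')
--         else:
--             orbital_list.append(orb_list[x])
--
--     return orbital_list, orbital_string_input
-- ===== SOURCE B (Python) =====
-- def my_mo_list(before_homo, after_homo):
--     # Same checks and orbkit string as A; labels decided from the integer itself in one pass.
--     assert isinstance(before_homo, int), 'input must be integer'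
--     assert isinstance(after_homo, int), 'input must be integer'
--
--     if before_homo and after_homo < 0:
--         raise Exception('list must begin at lowest MO, this list would be reversed')
--     elif after_homo < 0 and abs(after_homo) > abs(before_homo):
--         raise Exception('if after_homo is negative, absolute value must be less or equal to before_homo')
--     elif before_homo < 0 and abs(before_homo) > abs(after_homo):
--         raise Exception('if before_homo is negative, absolute value must be less or equal to after_homo')
--
--     orbital_string_input = 'homo-' + str(before_homo) + ':lumo+' + str(after_homo)
--
--     orbital_list = []
--     for x in range(-before_homo, after_homo + 1):
--         if x < 0:
--             orbital_list.append('HOMO' + str(x))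
--         elif x == 0:
--             orbital_list.append('HOMO')
--         elif x == 1:
--             orbital_list.append('LUMO')
--         else:
--             orbital_list.append('HOMO+' + str(x))
--     return orbital_list, orbital_string_input
-- ===== Notes on version B (the rewrite author's own statement) =====
-- stated objective: simpler
-- what changed: Replaced the two-stage construction (build 'HOMO+'+str(x) strings, then re-scan each label with substring tests and string replace to patch it) by a single loop that decides each label directly from the integer x (x<0, x==0, x==1, else), dropping the intermediate list and all string inspection.
import Mathlib
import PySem

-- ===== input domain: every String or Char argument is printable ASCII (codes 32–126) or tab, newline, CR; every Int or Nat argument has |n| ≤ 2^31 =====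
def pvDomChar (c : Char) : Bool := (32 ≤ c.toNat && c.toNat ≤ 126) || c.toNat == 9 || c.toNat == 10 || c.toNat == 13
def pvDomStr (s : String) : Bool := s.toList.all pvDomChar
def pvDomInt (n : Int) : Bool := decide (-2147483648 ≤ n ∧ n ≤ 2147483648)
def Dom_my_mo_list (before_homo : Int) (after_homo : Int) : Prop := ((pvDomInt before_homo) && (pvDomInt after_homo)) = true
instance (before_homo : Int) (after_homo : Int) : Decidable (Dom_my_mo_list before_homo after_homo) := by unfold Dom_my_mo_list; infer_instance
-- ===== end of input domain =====

-- B replaces A's two-stage label construction (build 'HOMO+'+str(x) then patch each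
-- string by substring tests and replace) with one pass branching on the integer x itself.

-- ===== PORT A =====
def my_mo_list (before_homo : Int) (after_homo : Int) : List String × String :=
  let orbital_string_input : String :=
    "homo-" ++ PySem.Int.toStr before_homo ++ ":lumo+" ++ PySem.Int.toStr after_homo
  let orb_list : List String :=
    (PySem.List.pyRange (-before_homo) (after_homo + 1) 1).map
      (fun x => "HOMO+" ++ PySem.Int.toStr x)
  let orbital_list : List String :=
    (PySem.List.pyRange 0 (PySem.List.len orb_list) 1).foldl
      (fun acc x =>
        if PySem.Str.isIn "-" (PySem.List.pyGetD orb_list x "") then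
          acc ++ [PySem.Str.replace (PySem.List.pyGetD orb_list x "") "+" ""]
        else if PySem.Str.isIn "0" (PySem.List.pyGetD orb_list x "") then
          acc ++ [PySem.Str.replace (PySem.List.pyGetD orb_list x "") "+0" ""]
        else if PySem.List.pyGetD orb_list x "" == "HOMO+1" then
          acc ++ ["LUMO"]
        else
          acc ++ [PySem.List.pyGetD orb_list x ""]) []
  (orbital_list, orbital_string_input)

-- ===== PORT B =====
def my_mo_list_alt (before_homo : Int) (after_homo : Int) : List String × String :=
  let orbital_string_input : String :=
    "homo-" ++ PySem.Int.toStr before_homo ++ ":lumo+" ++ PySem.Int.toStr after_homo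
  let orbital_list : List String :=
    (PySem.List.pyRange (-before_homo) (after_homo + 1) 1).foldl
      (fun acc x =>
        if x < 0 then acc ++ ["HOMO" ++ PySem.Int.toStr x]
        else if x = 0 then acc ++ ["HOMO"]
        else if x = 1 then acc ++ ["LUMO"]
        else acc ++ ["HOMO+" ++ PySem.Int.toStr x]) []
  (orbital_list, orbital_string_input)

-- ===== PRECONDITION & SPEC =====
-- Pre_ excludes exactly the inputs on which A raises its explicit Exceptions:
-- after_homo < 0 always raises, and before_homo < 0 raises unless -before_homo ≤ after_homo.
def Pre_my_mo_list (before_homo : Int) (after_homo : Int) : Prop :=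
  0 ≤ after_homo ∧ (0 ≤ before_homo ∨ -before_homo ≤ after_homo)
instance (before_homo : Int) (after_homo : Int) : Decidable (Pre_my_mo_list before_homo after_homo) := by
  unfold Pre_my_mo_list; infer_instance
def pvWitness_my_mo_list : Int × Int := (2, 2)

def Spec_my_mo_list (before_homo : Int) (after_homo : Int) (out : List String × String) : Prop := out = my_mo_list_alt before_homo after_homo
instance (before_homo : Int) (after_homo : Int) (out : List String × String) : Decidable (Spec_my_mo_list before_homo after_homo out) := by unfold Spec_my_mo_list; infer_instance

-- ===== CLAIM (what is proved, stated in full; the proofs are below) =====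
def Claim_equal_my_mo_list : Prop := ∀ (before_homo : Int) (after_homo : Int), Dom_my_mo_list before_homo after_homo → Pre_my_mo_list before_homo after_homo → Spec_my_mo_list before_homo after_homo (my_mo_list before_homo after_homo)

-- ===== LEMMAS AND PROOFS =====

-- A's per-label patch and B's per-integer label, as functions (proof-only helpers).
def pvALabel (s : String) : String :=
  if PySem.Str.isIn "-" s then PySem.Str.replace s "+" ""
  else if PySem.Str.isIn "0" s then PySem.Str.replace s "+0" ""
  else if s == "HOMO+1" then "LUMO"
  else s

def pvBLabel (x : Int) : String :=
  if x < 0 then "HOMO" ++ PySem.Int.toStr x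
  else if x = 0 then "HOMO"
  else if x = 1 then "LUMO"
  else "HOMO+" ++ PySem.Int.toStr x

-- every character of Nat.toDigits 10 n is a decimal digit
theorem pv_toDigitsCore_zero (n : Nat) (l : List Char) : Nat.toDigitsCore 10 0 n l = l := rfl

theorem pv_toDigitsCore_succ (f n : Nat) (l : List Char) :
    Nat.toDigitsCore 10 (f + 1) n l =
      if n / 10 = 0 then (n % 10).digitChar :: l
      else Nat.toDigitsCore 10 f (n / 10) ((n % 10).digitChar :: l) := rfl

theorem pv_toDigitsCore_mem (f : Nat) : ∀ (n : Nat) (l : List Char) (c : Char),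
    c ∈ Nat.toDigitsCore 10 f n l → c ∈ l ∨ ∃ d, d < 10 ∧ c = Nat.digitChar d := by
  induction f with
  | zero => intro n l c h; exact Or.inl h
  | succ f ih =>
    intro n l c h
    rw [pv_toDigitsCore_succ] at h
    by_cases h10 : n / 10 = 0
    · rw [if_pos h10] at h
      rcases List.mem_cons.mp h with h1 | h1
      · exact Or.inr ⟨n % 10, Nat.mod_lt _ (by norm_num), h1⟩
      · exact Or.inl h1
    · rw [if_neg h10] at h
      rcases ih (n / 10) (Nat.digitChar (n % 10) :: l) c h with h1 | h1
      · rcases List.mem_cons.mp h1 with h2 | h2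
        · exact Or.inr ⟨n % 10, Nat.mod_lt _ (by norm_num), h2⟩
        · exact Or.inl h2
      · exact Or.inr h1

theorem pv_digitChar_mem (d : Nat) (hd : d < 10) :
    Nat.digitChar d ∈ ['0','1','2','3','4','5','6','7','8','9'] := by
  interval_cases d <;> decide

theorem pv_not_mem_toDigits (n : Nat) (c : Char)
    (hc : c ∉ ['0','1','2','3','4','5','6','7','8','9']) : c ∉ Nat.toDigits 10 n := by
  intro h
  rcases pv_toDigitsCore_mem (n + 1) n [] c h with h1 | ⟨d, hd, rfl⟩
  · simp at h1
  · exact hc (pv_digitChar_mem d hd)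

-- the leading digit of a positive number is non-zero
theorem pv_toDigitsCore_head (f : Nat) : ∀ (n : Nat) (l : List Char), 0 < n → n ≤ f →
    ∃ d rest, 0 < d ∧ d < 10 ∧ Nat.toDigitsCore 10 f n l = Nat.digitChar d :: rest := by
  induction f with
  | zero => intro n l hn hf; omega
  | succ f ih =>
    intro n l hn hf
    rw [pv_toDigitsCore_succ]
    by_cases h10 : n / 10 = 0
    · rw [if_pos h10]
      exact ⟨n % 10, l, by omega, by omega, rfl⟩
    · rw [if_neg h10]
      exact ih (n / 10) _ (by omega) (by omega)

theorem pv_toDigits_head (n : Nat) (hn : 0 < n) :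
    ∃ d rest, 0 < d ∧ d < 10 ∧ Nat.toDigits 10 n = Nat.digitChar d :: rest :=
  pv_toDigitsCore_head (n + 1) n [] hn (by omega)

theorem pv_digitChar_pos_ne_zero (d : Nat) (h0 : 0 < d) (h10 : d < 10) :
    Nat.digitChar d ≠ '0' := by
  interval_cases d <;> decide

theorem pv_toDigitsCore_len (f : Nat) : ∀ (n : Nat) (l : List Char),
    l.length + 1 ≤ (Nat.toDigitsCore 10 (f + 1) n l).length := by
  induction f with
  | zero =>
    intro n l
    rw [pv_toDigitsCore_succ]
    by_cases h10 : n / 10 = 0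
    · rw [if_pos h10]; simp
    · rw [if_neg h10, pv_toDigitsCore_zero]; simp
  | succ f ih =>
    intro n l
    rw [pv_toDigitsCore_succ]
    by_cases h10 : n / 10 = 0
    · rw [if_pos h10]; simp
    · rw [if_neg h10]
      refine le_trans ?_ (ih (n / 10) (Nat.digitChar (n % 10) :: l))
      simp
  
theorem pv_toDigits_ne_one (n : Nat) (hn : 2 ≤ n) : Nat.toDigits 10 n ≠ ['1'] := by
  by_cases h : n < 10
  · have h10 : n / 10 = 0 := by omega
    show Nat.toDigitsCore 10 (n + 1) n [] ≠ ['1']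
    rw [pv_toDigitsCore_succ n n [], if_pos h10]
    intro hc
    have h1 : (n % 10).digitChar = '1' := (List.cons_eq_cons.mp hc).1
    have hn10 : n % 10 = n := by omega
    rw [hn10] at h1
    interval_cases n <;> revert h1 <;> decide
  · intro hc
    have h10 : ¬ n / 10 = 0 := by omega
    obtain ⟨f, hf⟩ : ∃ f, n = f + 1 := ⟨n - 1, by omega⟩
    have hstep : Nat.toDigits 10 n = Nat.toDigitsCore 10 n (n / 10) [(n % 10).digitChar] := by
      show Nat.toDigitsCore 10 (n + 1) n [] = _
      rw [pv_toDigitsCore_succ n n [], if_neg h10]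
    have hlen : (1:Nat) + 1 ≤ (Nat.toDigitsCore 10 n (n / 10) [(n % 10).digitChar]).length := by
      have h2 := pv_toDigitsCore_len f (n / 10) [(n % 10).digitChar]
      rw [← hf] at h2
      simpa using h2
    rw [← hstep, hc] at hlen
    simp at hlen

-- a single occurrence of c splits a list uniquely
theorem pv_unique_split (c : Char) : ∀ (h t l r : List Char), c ∉ h → c ∉ t →
    h ++ c :: t = l ++ c :: r → h = l ∧ t = r := by
  intro h
  induction h with
  | nil =>
    intro t l r _ ht heq
    cases l with
    | nil => simpa using heq
    | cons b l' =>
      simp only [List.nil_append, List.cons_append, List.cons_eq_cons] at heq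
      have : c ∈ t := by rw [heq.2]; exact List.mem_append_right l' List.mem_cons_self
      exact absurd this ht
  | cons a h' ih =>
    intro t l r hh ht heq
    cases l with
    | nil =>
      simp only [List.cons_append, List.nil_append, List.cons_eq_cons] at heq
      have : c ∈ a :: h' := by rw [← heq.1]; exact List.mem_cons_self
      exact absurd this hh
    | cons b l' =>
      simp only [List.cons_append, List.cons_eq_cons] at heq
      obtain ⟨h1, h2⟩ := ih t l' r (fun hm => hh (List.mem_cons_of_mem a hm)) ht heq.2
      exact ⟨by rw [heq.1, h1], h2⟩

-- replace with a pattern that does not occur is the identity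
theorem pv_replace_go_no_occ (old new : List Char) : ∀ (f : Nat) (l acc : List Char),
    ¬ old <:+: l → PySem.Chars.replace.go old new f l acc = acc.reverse ++ l := by
  intro f
  induction f with
  | zero => intro l acc _; rfl
  | succ f ih =>
    intro l acc hno
    cases l with
    | nil => simp [PySem.Chars.replace.go]
    | cons ch t =>
      have hpre : old.isPrefixOf (ch :: t) = false := by
        rw [← Bool.not_eq_true, List.isPrefixOf_iff_prefix]
        exact fun hp => hno hp.isInfix
      simp only [PySem.Chars.replace.go, hpre, Bool.false_eq_true, if_false]
      rw [ih t (ch :: acc) (fun hi => hno (hi.trans (List.suffix_cons ch t).isInfix))]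
      simp

theorem pv_replace_no_occ (s old new : List Char) (hne : old ≠ []) (hno : ¬ old <:+: s) :
    PySem.Chars.replace s old new = s := by
  have h0 : old.isEmpty = false := by
    cases old with
    | nil => exact absurd rfl hne
    | cons x xs => rfl
  simp only [PySem.Chars.replace, h0, Bool.false_eq_true, if_false]
  simpa using pv_replace_go_no_occ old new s.length s [] hno

-- replacing a single character by nothing is filtering it out
theorem pv_replace_go_single (c : Char) : ∀ (f : Nat) (l acc : List Char), l.length ≤ f →
    PySem.Chars.replace.go [c] [] f l acc = acc.reverse ++ l.filter (fun a => a != c) := by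
  intro f
  induction f with
  | zero =>
    intro l acc hl
    obtain rfl : l = [] := List.eq_nil_of_length_eq_zero (by omega)
    simp [PySem.Chars.replace.go]
  | succ f ih =>
    intro l acc hl
    cases l with
    | nil => simp [PySem.Chars.replace.go]
    | cons ch t =>
      by_cases hc : ch = c
      · have hpre : List.isPrefixOf [c] (ch :: t) = true := by
          rw [List.isPrefixOf_iff_prefix, List.cons_prefix_cons]
          exact ⟨hc.symm, List.nil_prefix⟩
        simp only [PySem.Chars.replace.go, hpre, if_true, List.reverse_nil, List.nil_append,
          List.length_cons, List.length_nil, List.drop_succ_cons, List.drop_zero]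
        rw [ih t acc (by simp at hl; omega)]
        simp [hc]
      · have hpre : List.isPrefixOf [c] (ch :: t) = false := by
          rw [← Bool.not_eq_true, List.isPrefixOf_iff_prefix, List.cons_prefix_cons]
          exact fun hp => hc hp.1.symm
        simp only [PySem.Chars.replace.go, hpre, Bool.false_eq_true, if_false]
        rw [ih t (ch :: acc) (by simp at hl; omega)]
        simp [hc]

theorem pv_replace_single (s : List Char) (c : Char) :
    PySem.Chars.replace s [c] [] = s.filter (fun a => a != c) := by
  have h0 : ([c] : List Char).isEmpty = false := rfl
  simp only [PySem.Chars.replace, h0, Bool.false_eq_true, if_false]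
  simpa using pv_replace_go_single c s.length s [] (le_refl _)

-- the central per-element fact: A's patched label equals B's direct label
theorem pv_label_eq (x : Int) : pvALabel ("HOMO+" ++ PySem.Int.toStr x) = pvBLabel x := by
  rcases lt_trichotomy x 0 with hx | rfl | hx
  · have hpl : '+' ∉ Nat.toDigits 10 x.natAbs := pv_not_mem_toDigits _ _ (by decide)
    have hchars : PySem.Int.toChars x = '-' :: Nat.toDigits 10 x.natAbs := by
      simp [PySem.Int.toChars, hx]
    have htl : ("HOMO+" ++ PySem.Int.toStr x).toList
        = ['H','O','M','O','+'] ++ '-' :: Nat.toDigits 10 x.natAbs := by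
      rw [String.toList_append, PySem.Int.toList_toStr, hchars]
      congr 1
    have hin : PySem.Str.isIn "-" ("HOMO+" ++ PySem.Int.toStr x) = true := by
      rw [PySem.Str.isIn_iff_infix, htl, show ("-" : String).toList = ['-'] from rfl,
        List.singleton_infix_iff]
      exact List.mem_append_right _ List.mem_cons_self
    simp only [pvALabel, pvBLabel, hin, if_true, if_pos hx]
    apply String.toList_inj.mp
    rw [PySem.Str.toList_replace, htl, show ("+" : String).toList = ['+'] from rfl,
      show ("" : String).toList = ([] : List Char) from rfl, pv_replace_single,
      String.toList_append, PySem.Int.toList_toStr, hchars]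
    have hfds : (Nat.toDigits 10 x.natAbs).filter (fun a => a != '+') = Nat.toDigits 10 x.natAbs :=
      List.filter_eq_self.mpr (fun a ha => by simpa using fun h : a = '+' => hpl (h ▸ ha))
    simp [hfds]
  · decide
  · by_cases h1 : x = 1
    · subst h1; decide
    · have hx2 : (2:Int) ≤ x := by omega
      have hn2 : 2 ≤ x.toNat := by omega
      have hchars : PySem.Int.toChars x = Nat.toDigits 10 x.toNat := by
        simp [PySem.Int.toChars, not_lt.mpr (le_of_lt hx)]
      have hpl : '+' ∉ Nat.toDigits 10 x.toNat := pv_not_mem_toDigits _ _ (by decide)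
      have hmn : '-' ∉ Nat.toDigits 10 x.toNat := pv_not_mem_toDigits _ _ (by decide)
      have htl : ("HOMO+" ++ PySem.Int.toStr x).toList
          = ['H','O','M','O','+'] ++ Nat.toDigits 10 x.toNat := by
        rw [String.toList_append, PySem.Int.toList_toStr, hchars]
        congr 1
      obtain ⟨d, rest, hd0, hd10, hds⟩ := pv_toDigits_head x.toNat (by omega)
      have hinm : PySem.Str.isIn "-" ("HOMO+" ++ PySem.Int.toStr x) = false := by
        rw [← Bool.not_eq_true, PySem.Str.isIn_iff_infix, htl,
          show ("-" : String).toList = ['-'] from rfl, List.singleton_infix_iff]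
        intro hmem
        rcases List.mem_append.mp hmem with h | h
        · simp at h
        · exact hmn h
      simp only [pvALabel, pvBLabel, hinm, Bool.false_eq_true, if_false,
        if_neg (not_lt.mpr (le_of_lt hx)), if_neg (show ¬ x = 0 by omega), if_neg h1]
      by_cases h0 : ('0' : Char) ∈ Nat.toDigits 10 x.toNat
      · have hin0 : PySem.Str.isIn "0" ("HOMO+" ++ PySem.Int.toStr x) = true := by
          rw [PySem.Str.isIn_iff_infix, htl, show ("0" : String).toList = ['0'] from rfl,
            List.singleton_infix_iff]
          exact List.mem_append_right _ h0
        simp only [hin0, if_true]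
        apply String.toList_inj.mp
        rw [PySem.Str.toList_replace, htl, show ("+0" : String).toList = ['+','0'] from rfl,
          show ("" : String).toList = ([] : List Char) from rfl]
        have hno : ¬ ['+','0'] <:+: ['H','O','M','O','+'] ++ Nat.toDigits 10 x.toNat := by
          intro hinf
          obtain ⟨s, t, hst⟩ := hinf
          obtain ⟨hs, hts⟩ :=
            pv_unique_split '+' ['H','O','M','O'] (Nat.toDigits 10 x.toNat) s ('0' :: t)
              (by decide) hpl (by simpa using hst.symm)
          rw [hds] at hts
          exact pv_digitChar_pos_ne_zero d hd0 hd10 (List.cons_eq_cons.mp hts).1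
        rw [pv_replace_no_occ _ _ _ (by simp) hno]
      · have hin0 : PySem.Str.isIn "0" ("HOMO+" ++ PySem.Int.toStr x) = false := by
          rw [← Bool.not_eq_true, PySem.Str.isIn_iff_infix, htl,
            show ("0" : String).toList = ['0'] from rfl, List.singleton_infix_iff]
          intro hmem
          rcases List.mem_append.mp hmem with h | h
          · simp at h
          · exact h0 h
        have hne : (("HOMO+" ++ PySem.Int.toStr x) == "HOMO+1") = false := by
          rw [← Bool.not_eq_true, beq_iff_eq]
          intro heq
          have h2 := String.toList_inj.mpr heq
          rw [htl] at h2
          have h3 : Nat.toDigits 10 x.toNat = ['1'] := by simpa using h2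
          exact pv_toDigits_ne_one x.toNat hn2 h3
        simp only [hin0, hne, Bool.false_eq_true, if_false]

-- the two folded lists coincide
theorem pv_lists_eq (b a : Int) :
    (PySem.List.pyRange 0
        (PySem.List.len ((PySem.List.pyRange (-b) (a + 1) 1).map
          (fun x => "HOMO+" ++ PySem.Int.toStr x))) 1).foldl
      (fun acc x =>
        if PySem.Str.isIn "-" (PySem.List.pyGetD ((PySem.List.pyRange (-b) (a + 1) 1).map
            (fun x => "HOMO+" ++ PySem.Int.toStr x)) x "") then
          acc ++ [PySem.Str.replace (PySem.List.pyGetD ((PySem.List.pyRange (-b) (a + 1) 1).map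
            (fun x => "HOMO+" ++ PySem.Int.toStr x)) x "") "+" ""]
        else if PySem.Str.isIn "0" (PySem.List.pyGetD ((PySem.List.pyRange (-b) (a + 1) 1).map
            (fun x => "HOMO+" ++ PySem.Int.toStr x)) x "") then
          acc ++ [PySem.Str.replace (PySem.List.pyGetD ((PySem.List.pyRange (-b) (a + 1) 1).map
            (fun x => "HOMO+" ++ PySem.Int.toStr x)) x "") "+0" ""]
        else if PySem.List.pyGetD ((PySem.List.pyRange (-b) (a + 1) 1).map
            (fun x => "HOMO+" ++ PySem.Int.toStr x)) x "" == "HOMO+1" then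
          acc ++ ["LUMO"]
        else
          acc ++ [PySem.List.pyGetD ((PySem.List.pyRange (-b) (a + 1) 1).map
            (fun x => "HOMO+" ++ PySem.Int.toStr x)) x ""]) []
    = (PySem.List.pyRange (-b) (a + 1) 1).foldl
        (fun acc x =>
          if x < 0 then acc ++ ["HOMO" ++ PySem.Int.toStr x]
          else if x = 0 then acc ++ ["HOMO"]
          else if x = 1 then acc ++ ["LUMO"]
          else acc ++ ["HOMO+" ++ PySem.Int.toStr x]) [] := by
  have hbA : (fun (acc : List String) (s : String) =>
      if PySem.Str.isIn "-" s then acc ++ [PySem.Str.replace s "+" ""]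
      else if PySem.Str.isIn "0" s then acc ++ [PySem.Str.replace s "+0" ""]
      else if s == "HOMO+1" then acc ++ ["LUMO"]
      else acc ++ [s]) = fun acc s => acc ++ [pvALabel s] := by
    funext acc s
    simp only [pvALabel]
    split_ifs <;> rfl
  have hbB : (fun (acc : List String) (x : Int) =>
      if x < 0 then acc ++ ["HOMO" ++ PySem.Int.toStr x]
      else if x = 0 then acc ++ ["HOMO"]
      else if x = 1 then acc ++ ["LUMO"]
      else acc ++ ["HOMO+" ++ PySem.Int.toStr x]) = fun acc x => acc ++ [pvBLabel x] := by
    funext acc x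
    simp only [pvBLabel]
    split_ifs <;> rfl
  calc
    _ = ((PySem.List.pyRange (-b) (a + 1) 1).map (fun x => "HOMO+" ++ PySem.Int.toStr x)).foldl
          (fun acc s =>
            if PySem.Str.isIn "-" s then acc ++ [PySem.Str.replace s "+" ""]
            else if PySem.Str.isIn "0" s then acc ++ [PySem.Str.replace s "+0" ""]
            else if s == "HOMO+1" then acc ++ ["LUMO"]
            else acc ++ [s]) [] :=
        PySem.List.foldl_pyRange_zero_pyGetD _ ""
          (fun acc s =>
            if PySem.Str.isIn "-" s then acc ++ [PySem.Str.replace s "+" ""]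
            else if PySem.Str.isIn "0" s then acc ++ [PySem.Str.replace s "+0" ""]
            else if s == "HOMO+1" then acc ++ ["LUMO"]
            else acc ++ [s]) []
    _ = ((PySem.List.pyRange (-b) (a + 1) 1).map (fun x => "HOMO+" ++ PySem.Int.toStr x)).foldl
          (fun acc s => acc ++ [pvALabel s]) [] := by rw [hbA]
    _ = (PySem.List.pyRange (-b) (a + 1) 1).map (pvALabel ∘ fun x => "HOMO+" ++ PySem.Int.toStr x) := by
        rw [PySem.List.foldl_append_singleton_eq_map, List.map_map]
        rfl
    _ = (PySem.List.pyRange (-b) (a + 1) 1).map pvBLabel :=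
        List.map_congr_left (fun x _ => pv_label_eq x)
    _ = _ := by
        rw [hbB]
        simpa using (PySem.List.foldl_append_singleton_eq_map pvBLabel
          (PySem.List.pyRange (-b) (a + 1) 1) []).symm

-- ===== VERDICT (by name: the statement is the Claim_ definition above) =====
theorem my_mo_list_spec : Claim_equal_my_mo_list := by
  intro b a _ _
  unfold Spec_my_mo_list my_mo_list my_mo_list_alt
  exact congrArg₂ Prod.mk (pv_lists_eq b a) rfl
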